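-- pv_equiv track=rewrite | github.com/pypi-data/pypi-mirror-402 | packages/jasper-finance/jasper_finance-1.0.8.tar.gz/jasper_finance-1.0.8/jasper/cli/interface.py | _fix_markdown_tables
-- ===== SOURCE A (Python) =====
-- def _fix_markdown_tables(text: str) -> str:
--     """
--     Ensures markdown tables are properly formatted for Rich.
--     1. Fixes inline rows (replaces | | with newlines)
--     2. Ensures blank lines before/after tables
--     """
--     # Fix inline row compression (common in some LLM outputs)
--     text = text.replace(" | | ", " |\n| ")
--
--     lines = text.split('\n')
--     new_lines = []
--     in_table = False
--
--     for line in lines: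
--         # A table line strictly starts and ends with | (common in our output)
--         # or has multiple pipes.
--         is_table_line = line.strip().startswith('|') and line.strip().endswith('|') and line.count('|') > 1
--
--         if is_table_line and not in_table:
--             # Starting a table
--             if new_lines and new_lines[-1].strip():
--                 new_lines.append('')
--             in_table = True
--         elif not is_table_line and in_table:
--             # Maybe it's a multi-pipe line that doesn't start/end with | but is still table?
--             # Markdown tables must start/end with | for our parser
--             if line.strip():
--                 new_lines.append('')
--             in_table = False
--
--         new_lines.append(line)
--     return '\n'.join(new_lines)
-- ===== SOURCE B (Python) =====
-- def _fix_markdown_tables(text: str) -> str: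
--     # Run-length segmentation: group the lines into maximal runs of table /
--     # non-table lines, then stitch the runs back together, inserting a blank
--     # line at a run boundary when the adjacent line on the non-table side is
--     # nonempty.
--     text = text.replace(" | | ", " |\n| ")
--     lines = text.split('\n')
--
--     def is_row(l):
--         s = l.strip()
--         return s.startswith('|') and s.endswith('|') and l.count('|') > 1
--
--     # Pass 1: segment into runs [flag, block] with constant table-ness.
--     runs = []
--     for l in lines:
--         f = is_row(l)
--         if runs and runs[-1][0] == f:
--             runs[-1][1].append(l)
--         else:
--             runs.append([f, [l]])
--
--     # Pass 2: stitch the runs, separating table runs from nonempty neighbours.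
--     out = []
--     for k, (f, block) in enumerate(runs):
--         if k > 0:
--             edge = runs[k - 1][1][-1] if f else block[0]
--             if edge.strip():
--                 out.append('')
--         out.extend(block)
--     return '\n'.join(out)
-- ===== Notes on version B (the rewrite author's own statement) =====
-- stated objective: alternative
-- what changed: Replaces A's single stateful pass (running in_table flag plus a peek at the output buffer's last element) with a two-stage run-length segmentation: first group the lines into maximal table/non-table runs, then stitch the runs back together, inserting a blank line at each run boundary whose non-table-side neighbouring line is nonempty.
import Mathlib
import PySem

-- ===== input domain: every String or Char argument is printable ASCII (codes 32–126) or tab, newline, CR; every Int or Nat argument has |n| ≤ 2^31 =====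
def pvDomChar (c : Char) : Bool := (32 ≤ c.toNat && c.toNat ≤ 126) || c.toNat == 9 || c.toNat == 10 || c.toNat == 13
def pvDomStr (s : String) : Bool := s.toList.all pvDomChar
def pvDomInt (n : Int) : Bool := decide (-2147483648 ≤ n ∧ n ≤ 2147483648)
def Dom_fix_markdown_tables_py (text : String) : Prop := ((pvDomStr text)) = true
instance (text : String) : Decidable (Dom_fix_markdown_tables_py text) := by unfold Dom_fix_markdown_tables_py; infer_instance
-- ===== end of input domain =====

-- B replaces A's single stateful pass (running in_table flag + peek at the output buffer)
-- by run-length segmentation: group the lines into maximal table/non-table runs, then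
-- stitch the runs back together with blank-line separators (objective: alternative, same cost).

-- ===== PORT A =====
-- A's inline 'is_table_line' expression (computed per line inside the loop)
def pvIsTableLine (line : String) : Bool :=
  PySem.Str.startswith (PySem.Str.strip line) "|"
    && PySem.Str.endswith (PySem.Str.strip line) "|"
    && decide ((1 : Nat) < PySem.Str.count line "|")

-- one iteration of A's for-loop: state = (new_lines, in_table)
def pvStepA (s : List String × Bool) (line : String) : List String × Bool :=
  let acc := s.1
  let inTable := s.2
  let isTable := pvIsTableLine line
  if isTable && !inTable then
    ((if !acc.isEmpty && (PySem.Str.strip (PySem.List.pyGetD acc (-1) "") != "") then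
        acc ++ [""] else acc) ++ [line], true)
  else if !isTable && inTable then
    ((if PySem.Str.strip line != "" then acc ++ [""] else acc) ++ [line], false)
  else
    (acc ++ [line], inTable)

def fix_markdown_tables_py (text : String) : String :=
  let text := PySem.Str.replace text " | | " " |\n| "
  let lines := (PySem.Str.split? text "\n").getD []
  PySem.Str.join "\n" ((lines.foldl pvStepA ([], false)).1)

-- ===== PORT B =====
-- Source B's 'is_row' helper (strip computed once)
def pvIsRow (l : String) : Bool :=
  let s := PySem.Str.strip l
  PySem.Str.startswith s "|" && PySem.Str.endswith s "|"
    && decide ((1 : Nat) < PySem.Str.count l "|")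

-- pass 1, one iteration: extend the last run if its table-ness matches, else open a new run
def pvGroupStep (runs : List (Bool × List String)) (l : String) : List (Bool × List String) :=
  let f := pvIsRow l
  match runs.getLast? with
  | some r => if r.1 == f then runs.dropLast ++ [(f, r.2 ++ [l])] else runs ++ [(f, [l])]
  | none => runs ++ [(f, [l])]

-- pass 2, one iteration of 'for k, (f, block) in enumerate(runs)'; the pyGetD defaults are
-- never used: every block is nonempty and k-1 is in range whenever 0 < k
def pvStitchStep (runs : List (Bool × List String)) (out : List String)
    (p : Int × (Bool × List String)) : List String :=
  let k := p.1
  let f := p.2.1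
  let block := p.2.2
  let out :=
    if 0 < k then
      let edge := if f then PySem.List.pyGetD (PySem.List.pyGetD runs (k - 1) (false, [])).2 (-1) ""
                  else PySem.List.pyGetD block 0 ""
      if PySem.Str.strip edge != "" then out ++ [""] else out
    else out
  out ++ block

def fix_markdown_tables_py_alt (text : String) : String :=
  let text := PySem.Str.replace text " | | " " |\n| "
  let lines := (PySem.Str.split? text "\n").getD []
  let runs := lines.foldl pvGroupStep []
  PySem.Str.join "\n" ((PySem.List.enumerate runs).foldl (pvStitchStep runs) [])

-- ===== PRECONDITION & SPEC =====
def Spec_fix_markdown_tables_py (text : String) (out : String) : Prop := out = fix_markdown_tables_py_alt text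
instance (text : String) (out : String) : Decidable (Spec_fix_markdown_tables_py text out) := by unfold Spec_fix_markdown_tables_py; infer_instance

-- ===== CLAIM (what is proved, stated in full; the proofs are below) =====
def Claim_equal_fix_markdown_tables_py : Prop := ∀ (text : String), Dom_fix_markdown_tables_py text → Spec_fix_markdown_tables_py text (fix_markdown_tables_py text)

-- ===== LEMMAS AND PROOFS =====

-- the two per-line tests coincide
theorem pvIsRow_eq (l : String) : pvIsRow l = pvIsTableLine l := rfl

-- proof-only reference pass: the stateless (previous, current)-pair formulation, the
-- common intermediate between A's stateful pass and B's run segmentation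
def pvStepB (parts : List String) (p : Option String × String) : List String :=
  let prev := p.1
  let line := p.2
  let parts :=
    match prev with
    | none => parts
    | some pv =>
      if pvIsRow pv != pvIsRow line then
        (if PySem.Str.strip (if pvIsRow pv then line else pv) != "" then parts ++ [""]
         else parts)
      else parts
  parts ++ [line]

def pvPB (ls : List String) : List String :=
  (List.zip (none :: ls.map some) ls).foldl pvStepB []

def pvG (ls : List String) : List (Bool × List String) := ls.foldl pvGroupStep []

def pvS (runs : List (Bool × List String)) : List String :=
  (PySem.List.enumerate runs).foldl (pvStitchStep runs) []

-- ---- part 1: A's fold equals the pairwise fold ----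

theorem pvStepA_eq (acc : List String) (po : Option String) (l : String)
    (h : acc.getLast? = po) :
    pvStepA (acc, po.elim false pvIsRow) l = (pvStepB acc (po, l), pvIsRow l) := by
  cases po with
  | none =>
    have hacc : acc = [] := by simpa using h
    subst hacc
    cases ht : pvIsTableLine l <;>
      simp [pvStepA, pvStepB, pvIsRow_eq, ht]
  | some pv =>
    have hne : acc ≠ [] := by intro e; simp [e] at h
    have hlast : acc.getLast hne = pv := by
      have := List.getLast?_eq_some_getLast hne
      rw [h] at this; exact (Option.some.inj this).symm
    have hie : acc.isEmpty = false := by simp [hne]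
    cases hr : pvIsTableLine pv <;> cases ht : pvIsTableLine l <;>
      simp [pvStepA, pvStepB, pvIsRow_eq, hr, ht, hie,
            PySem.List.pyGetD_neg_one acc "" hne, hlast]

theorem pvStepB_getLast? (acc : List String) (p : Option String × String) :
    (pvStepB acc p).getLast? = some p.2 := by
  simp [pvStepB]

theorem pvMain : ∀ (ls acc : List String) (po : Option String),
    acc.getLast? = po →
    (ls.foldl pvStepA (acc, po.elim false pvIsRow)).1
      = (List.zip (po :: ls.map some) ls).foldl pvStepB acc := by
  intro ls
  induction ls with
  | nil => intro acc po _; rfl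
  | cons l ls ih =>
    intro acc po h
    rw [List.map_cons, List.zip_cons_cons, List.foldl_cons, List.foldl_cons,
        pvStepA_eq acc po l h]
    have := ih (pvStepB acc (po, l)) (some l) (pvStepB_getLast? acc (po, l))
    simpa using this

-- ---- part 2: the pairwise fold equals B's segment-and-stitch ----

-- snoc law for the pairwise fold
theorem pvZipPairs_snoc (p : Option String) (ls : List String) (l : String) :
    List.zip (p :: ls.map some ++ [some l]) (ls ++ [l])
      = List.zip (p :: ls.map some) ls ++ [(ls.getLast?.or p, l)] := by
  induction ls generalizing p with
  | nil => simp
  | cons x xs ih =>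
    have h : (x :: xs).getLast?.or p = xs.getLast?.or (some x) := by
      cases xs with
      | nil => simp
      | cons y ys =>
        obtain ⟨a, ha⟩ := Option.isSome_iff_exists.mp (List.getLast?_isSome.mpr (by simp) :
          (y :: ys).getLast?.isSome)
        simp [List.getLast?_cons_cons, ha]
    simp only [List.map_cons, List.cons_append, List.zip_cons_cons, h]
    exact congrArg _ (ih (some x))

theorem pvPB_snoc (ls : List String) (l : String) :
    pvPB (ls ++ [l]) = pvStepB (pvPB ls) (ls.getLast?, l) := by
  unfold pvPB
  rw [List.map_append, List.map_singleton, show none :: (ls.map some ++ [some l])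
      = none :: ls.map some ++ [some l] from rfl, pvZipPairs_snoc, List.foldl_append]
  simp

-- snoc law for pass 1
theorem pvG_snoc (ls : List String) (l : String) :
    pvG (ls ++ [l]) = pvGroupStep (pvG ls) l := by
  unfold pvG; rw [List.foldl_append]; rfl

-- a stitch step only reads 'runs' at index k-1, and only when 0 < k
theorem pvStitchStep_congr (runs0 runs1 : List (Bool × List String)) (out : List String)
    (p : Int × (Bool × List String))
    (h : 0 < p.1 → PySem.List.pyGetD runs0 (p.1 - 1) (false, [])
                  = PySem.List.pyGetD runs1 (p.1 - 1) (false, [])) :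
    pvStitchStep runs0 out p = pvStitchStep runs1 out p := by
  obtain ⟨k, f, block⟩ := p
  by_cases hk : 0 < k
  · simp only [pvStitchStep, if_pos hk, h hk]
  · simp only [pvStitchStep, if_neg hk]

-- reads strictly left of an append are reads of the left part
theorem pyGetD_append_left (xs ys : List (Bool × List String)) (i : Int)
    (h0 : 0 ≤ i) (h1 : i < xs.length) :
    PySem.List.pyGetD (xs ++ ys) i (false, []) = PySem.List.pyGetD xs i (false, []) := by
  obtain ⟨n, rfl⟩ := Int.eq_ofNat_of_zero_le h0
  have hn : n < xs.length := by exact_mod_cast h1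
  rw [PySem.List.pyGetD_natCast, PySem.List.pyGetD_natCast,
      List.getD_eq_getElem?_getD, List.getD_eq_getElem?_getD,
      List.getElem?_append_left hn]

theorem pvStitch_fold_congr (runs0 runs1 rs : List (Bool × List String)) (init : List String)
    (h : ∀ i : Int, 0 ≤ i → i < (rs.length : Int) - 1 →
          PySem.List.pyGetD runs0 i (false, []) = PySem.List.pyGetD runs1 i (false, [])) :
    (PySem.List.enumerate rs).foldl (pvStitchStep runs0) init
      = (PySem.List.enumerate rs).foldl (pvStitchStep runs1) init := by
  apply PySem.List.foldl_congr_mem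
  intro acc x hx
  obtain ⟨k, hk, rfl⟩ := (PySem.List.mem_enumerate_iff _ _ _).mp hx
  refine pvStitchStep_congr _ _ _ _ ?_
  intro hpos
  have hpos' : (0:Int) < 0 + (k:Int) := by simpa using hpos
  exact h _ (by omega) (by omega)

theorem pvS_snoc (runs0 rs : List (Bool × List String)) (r : Bool × List String)
    (init : List String) :
    (PySem.List.enumerate (rs ++ [r])).foldl (pvStitchStep runs0) init
      = pvStitchStep runs0 ((PySem.List.enumerate rs).foldl (pvStitchStep runs0) init)
          ((rs.length : Int), r) := by
  rw [PySem.List.enumerate_append, List.foldl_append]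
  simp [PySem.List.enumerate_cons, PySem.List.enumerate_nil]

-- case (a): the new line joins the last run
theorem pvS_extend (D : List (Bool × List String)) (f : Bool) (b : List String)
    (hb : b ≠ []) (l : String) :
    pvS (D ++ [(f, b ++ [l])]) = pvS (D ++ [(f, b)]) ++ [l] := by
  unfold pvS
  rw [pvS_snoc, pvS_snoc]
  rw [pvStitch_fold_congr (D ++ [(f, b ++ [l])]) (D ++ [(f, b)]) D []
      (fun i h0 h1 => by
        rw [pyGetD_append_left _ _ _ h0 (by omega), pyGetD_append_left _ _ _ h0 (by omega)])]
  by_cases hD : 0 < (D.length : Int)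
  · have h0' : (0:Int) ≤ (D.length : Int) - 1 := by omega
    have h1' : (D.length : Int) - 1 < (D.length : Int) := by omega
    have e1 := pyGetD_append_left D [(f, b ++ [l])] _ h0' (by exact_mod_cast h1')
    have e2 := pyGetD_append_left D [(f, b)] _ h0' (by exact_mod_cast h1')
    have hhead : PySem.List.pyGetD (b ++ [l]) 0 "" = PySem.List.pyGetD b 0 "" := by
      cases b with
      | nil => exact absurd rfl hb
      | cons y ys => simp [PySem.List.pyGetD_zero]
    simp only [pvStitchStep, if_pos hD, e1, e2, hhead]
    cases f <;> split <;> simp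
  · simp only [pvStitchStep, if_neg hD]
    simp

-- case (b): the new line opens a new run
theorem pvS_newrun (runs : List (Bool × List String)) (g : Bool) (l : String)
    (hr : runs ≠ []) (lastl : String)
    (hlast : (runs.getLast hr).2.getLast? = some lastl) :
    pvS (runs ++ [(g, [l])])
      = (if PySem.Str.strip (if g then lastl else l) != ""
         then pvS runs ++ [""] else pvS runs) ++ [l] := by
  unfold pvS
  rw [pvS_snoc]
  rw [pvStitch_fold_congr (runs ++ [(g, [l])]) runs runs []
      (fun i h0 h1 => pyGetD_append_left _ _ _ h0 (by omega))]
  have hlen : 0 < runs.length := List.length_pos_iff.mpr hr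
  have hpos : (0:Int) < (runs.length : Int) := by exact_mod_cast hlen
  have h0' : (0:Int) ≤ (runs.length : Int) - 1 := by omega
  have h1' : (runs.length : Int) - 1 < (runs.length : Int) := by exact_mod_cast (by omega : (runs.length : Int) - 1 < (runs.length : Int))
  have egetlast : PySem.List.pyGetD runs ((runs.length : Int) - 1) (false, []) = runs.getLast hr := by
    have hcast : ((runs.length : Int) - 1) = ((runs.length - 1 : Nat) : Int) := by omega
    rw [hcast, PySem.List.pyGetD_natCast, List.getD_eq_getElem _ _ (by omega),
        List.getLast_eq_getElem]
  have hb2 : (runs.getLast hr).2 ≠ [] := by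
    intro e; rw [e] at hlast; simp at hlast
  have hlastv : (runs.getLast hr).2.getLast hb2 = lastl := by
    have := List.getLast?_eq_some_getLast hb2
    rw [this] at hlast
    exact Option.some.inj hlast.symm |>.symm
  simp only [pvStitchStep, if_pos hpos]
  rw [pyGetD_append_left runs [(g, [l])] _ h0' h1', egetlast]
  cases g
  · simp [PySem.List.pyGetD_zero]
  · simp [PySem.List.pyGetD_neg_one _ _ hb2, hlastv]

-- the main invariant, by induction from the right: B's two passes compute the pairwise fold
theorem pvInv (ls : List String) :
    pvS (pvG ls) = pvPB ls ∧
    ((ls = [] ∧ pvG ls = []) ∨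
      ∃ D b x, ls.getLast? = some x ∧ pvG ls = D ++ [(pvIsRow x, b)] ∧ b ≠ []
        ∧ b.getLast? = some x) := by
  induction ls using List.reverseRecOn with
  | nil => exact ⟨rfl, Or.inl ⟨rfl, rfl⟩⟩
  | append_singleton ls l ih =>
    obtain ⟨ihS, ihG⟩ := ih
    rw [pvG_snoc, pvPB_snoc]
    rcases ihG with ⟨hls, hG⟩ | ⟨D, b, x, hx, hG, hb, hbl⟩
    · subst hls
      refine ⟨?_, Or.inr ⟨[], [l], l, by simp, by simp [hG, pvGroupStep], by simp, by simp⟩⟩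
      rw [hG]
      simp [pvGroupStep, pvS, pvStepB, PySem.List.enumerate_cons, PySem.List.enumerate_nil,
        pvStitchStep, pvPB]
    · have hlast' : ls.getLast? = some x := hx
      rw [hG]
      have hGL : (D ++ [(pvIsRow x, b)]).getLast? = some (pvIsRow x, b) := by simp
      by_cases hf : pvIsRow x = pvIsRow l
      · -- same table-ness: the line joins the last run
        have hstep : pvGroupStep (D ++ [(pvIsRow x, b)]) l
            = D ++ [(pvIsRow l, b ++ [l])] := by
          simp [pvGroupStep, hf]
        rw [hstep]
        constructor
        · rw [show D ++ [(pvIsRow l, b ++ [l])] = D ++ [(pvIsRow x, b ++ [l])] from by rw [hf]]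
          rw [pvS_extend D _ b hb l, ← hG, ihS, hx]
          simp [pvStepB, hf]
        · exact Or.inr ⟨D, b ++ [l], l, by simp, rfl, by simp, by simp⟩
      · -- table-ness flips: a new run opens
        have hstep : pvGroupStep (D ++ [(pvIsRow x, b)]) l
            = (D ++ [(pvIsRow x, b)]) ++ [(pvIsRow l, [l])] := by
          simp [pvGroupStep, hf]
        rw [hstep]
        constructor
        · have hne : D ++ [(pvIsRow x, b)] ≠ [] := by simp
          have hlastr : ((D ++ [(pvIsRow x, b)]).getLast hne).2.getLast? = some x := by
            rw [List.getLast_append_singleton]; exact hbl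
          rw [pvS_newrun (D ++ [(pvIsRow x, b)]) (pvIsRow l) l hne x hlastr, ← hG, ihS, hx]
          simp only [pvStepB]
          have hne2 : (pvIsRow x != pvIsRow l) = true := by
            simpa using hf
          rw [show (if pvIsRow l then x else l) = (if pvIsRow x then l else x) from by
            cases hx' : pvIsRow x <;> cases hl' : pvIsRow l <;> simp_all]
          simp [hne2]
        · exact Or.inr ⟨D ++ [(pvIsRow x, b)], [l], l, by simp, rfl, by simp, by simp⟩

-- ===== VERDICT (by name: the statement is the Claim_ definition above) =====
theorem fix_markdown_tables_py_spec : Claim_equal_fix_markdown_tables_py := by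
  intro text _
  show fix_markdown_tables_py text = fix_markdown_tables_py_alt text
  unfold fix_markdown_tables_py fix_markdown_tables_py_alt
  refine congrArg (PySem.Str.join "\n") ?_
  have h1 := pvMain ((PySem.Str.split? (PySem.Str.replace text " | | " " |\n| ") "\n").getD []) [] none rfl
  have h2 := (pvInv ((PySem.Str.split? (PySem.Str.replace text " | | " " |\n| ") "\n").getD [])).1
  unfold pvPB pvS pvG at h2
  simp only [Option.elim] at h1
  exact h1.trans h2.symm
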